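-- pv_equiv track=rewrite | github.com/loociano/advent-of-code | aoc2020/src/day19/solution.py | _parse
-- ===== SOURCE A (Python) =====
-- from typing import List, Tuple, Dict
--
-- def _parse(rules_and_messages: List[str]) -> Tuple[Dict[int, str], List[str]]:
--   finished_rules = False
--   rules = {}
--   messages = []
--   for line in rules_and_messages:
--     if not line:
--       finished_rules = True
--     elif finished_rules: # messages
--       messages.append(line)
--     else: # rules
--       rule_num, rule = line.split(': ')
--       rules[int(rule_num)] = rule.replace('"', '')  # remove quotes for "a" and "b"
--   return rules, messages
-- ===== SOURCE B (Python) =====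
-- def _rule(line):
--   num, rule = line.split(': ')
--   return int(num), rule.replace('"', '')
--
--
-- def _parse(rules_and_messages):
--   try:
--     blank = rules_and_messages.index('')
--   except ValueError:
--     blank = len(rules_and_messages)
--   rules = dict(_rule(line) for line in rules_and_messages[:blank])
--   messages = [line for line in rules_and_messages[blank:] if line]
--   return rules, messages
-- ===== Notes on version B (the rewrite author's own statement) =====
-- stated objective: simpler
-- what changed: Replaces the stateful finished_rules-flag loop by locating the first blank line, building the dict from the prefix in one pass and the messages as a filter of the suffix.
import Mathlib
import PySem

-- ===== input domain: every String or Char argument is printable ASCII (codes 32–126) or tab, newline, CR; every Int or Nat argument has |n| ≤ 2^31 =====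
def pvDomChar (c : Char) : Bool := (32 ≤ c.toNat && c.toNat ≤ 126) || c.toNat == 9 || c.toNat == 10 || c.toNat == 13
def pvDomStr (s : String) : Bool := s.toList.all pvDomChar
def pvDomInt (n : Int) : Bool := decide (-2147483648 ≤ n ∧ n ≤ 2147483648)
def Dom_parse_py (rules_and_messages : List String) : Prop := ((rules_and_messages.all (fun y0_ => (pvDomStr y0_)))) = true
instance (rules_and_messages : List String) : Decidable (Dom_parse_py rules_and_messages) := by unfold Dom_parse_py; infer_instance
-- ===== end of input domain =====

-- B replaces A's stateful finished_rules flag by splitting the input at the first blank line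
-- (dict from the prefix, filtered suffix as messages); objective: simpler. Same return value on Pre_.

-- ===== PORT A =====
-- one loop iteration of A's for-loop; state = (finished_rules, rules, messages)
def parsePyStep (st : Bool × PySem.Dict Int String × List String) (line : String) :
    Bool × PySem.Dict Int String × List String :=
  if line = "" then (true, st.2.1, st.2.2)
  else if st.1 then (st.1, st.2.1, st.2.2 ++ [line])
  else
    match (PySem.Str.split? line ": ").getD [] with
    | [a, b] =>
      match PySem.Int.ofStr? a with
      | some n => (st.1, st.2.1.insert n (PySem.Str.replace b "\"" ""), st.2.2)
      | none => st  -- int() ValueError: excluded by Pre_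
    | _ => st       -- unpacking ValueError: excluded by Pre_

def parse_py (rules_and_messages : List String) : (List (Int × String)) × List String :=
  let s := rules_and_messages.foldl parsePyStep (false, PySem.Dict.empty, [])
  (s.2.1.items, s.2.2)

-- ===== PORT B =====
-- _rule helper of Source B (Pre_ excludes lines where the Python raises)
def ruleOf (line : String) : Int × String :=
  match (PySem.Str.split? line ": ").getD [] with
  | [a, b] => ((PySem.Int.ofStr? a).getD 0, PySem.Str.replace b "\"" "")
  | _ => (0, "")

def parse_py_alt (rules_and_messages : List String) : (List (Int × String)) × List String :=
  let blank := (PySem.List.index? rules_and_messages "").getD rules_and_messages.length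
  -- blank is a Nat ≤ length, so the Python slices [:blank]/[blank:] are exactly take/drop
  let rules := PySem.Dict.ofList ((rules_and_messages.take blank).map ruleOf)
  let messages := (rules_and_messages.drop blank).filter (fun l => l ≠ "")
  (rules.items, messages)

-- ===== PRECONDITION & SPEC =====
-- Pre_ excludes exactly the inputs on which A raises ValueError: a line in the rules section
-- (before the first blank line) that does not split on ': ' into exactly two parts, or whose
-- first part is not a valid int literal.
def Pre_parse_py (rules_and_messages : List String) : Prop :=
  ∀ line ∈ rules_and_messages.take
      ((PySem.List.index? rules_and_messages "").getD rules_and_messages.length),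
    ((PySem.Str.split? line ": ").getD []).length = 2 ∧
      (PySem.Int.ofStr? (((PySem.Str.split? line ": ").getD []).headD "")).isSome = true
instance (rules_and_messages : List String) : Decidable (Pre_parse_py rules_and_messages) := by
  unfold Pre_parse_py; infer_instance

def pvWitness_parse_py : List String := ["0: 4 5", "1: \"a\"", "", "abba", "", "bab"]

def Spec_parse_py (rules_and_messages : List String) (out : (List (Int × String)) × List String) : Prop := out = parse_py_alt rules_and_messages
instance (rules_and_messages : List String) (out : (List (Int × String)) × List String) : Decidable (Spec_parse_py rules_and_messages out) := by unfold Spec_parse_py; infer_instance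

-- ===== CLAIM (what is proved, stated in full; the proofs are below) =====
def Claim_equal_parse_py : Prop := ∀ (rules_and_messages : List String), Dom_parse_py rules_and_messages → Pre_parse_py rules_and_messages → Spec_parse_py rules_and_messages (parse_py rules_and_messages)

-- ===== LEMMAS AND PROOFS =====

-- after the flag is set, A only appends the non-empty lines
lemma foldl_step_true (lines : List String) (d : PySem.Dict Int String) (ms : List String) :
    lines.foldl parsePyStep (true, d, ms)
      = (true, d, ms ++ lines.filter (fun l => l ≠ "")) := by
  induction lines generalizing ms with
  | nil => simp
  | cons x xs ih =>
    by_cases hx : x = ""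
    · subst hx; simp [parsePyStep, ih]
    · simp [parsePyStep, hx, ih]

-- before the flag is set, A's fold computes B's decomposition
lemma foldl_step_false (lines : List String) (d : PySem.Dict Int String)
    (h : ∀ line ∈ lines.take ((PySem.List.index? lines "").getD lines.length),
      ((PySem.Str.split? line ": ").getD []).length = 2 ∧
        (PySem.Int.ofStr? (((PySem.Str.split? line ": ").getD []).headD "")).isSome = true) :
    lines.foldl parsePyStep (false, d, [])
      = (lines.contains "",
         ((lines.take ((PySem.List.index? lines "").getD lines.length)).map ruleOf).foldl
           (fun d p => d.insert p.1 p.2) d,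
         (lines.drop ((PySem.List.index? lines "").getD lines.length)).filter (fun l => l ≠ "")) := by
  induction lines generalizing d with
  | nil => simp
  | cons x xs ih =>
    by_cases hx : x = ""
    · subst hx
      rw [PySem.List.index?_cons_self]
      simp [parsePyStep, foldl_step_true]
    · have hidx : PySem.List.index? (x :: xs) "" = (PySem.List.index? xs "").map (· + 1) :=
        PySem.List.index?_cons_of_ne xs hx
      have hblank : (PySem.List.index? (x :: xs) "").getD (x :: xs).length
          = (PySem.List.index? xs "").getD xs.length + 1 := by
        rw [hidx]; cases PySem.List.index? xs "" <;> simp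
      have hxin : x ∈ (x :: xs).take ((PySem.List.index? (x :: xs) "").getD (x :: xs).length) := by
        rw [hblank]; simp
      obtain ⟨h2, h3⟩ := h x hxin
      match hs : (PySem.Str.split? x ": ").getD [] with
      | [a, b] =>
        rw [hs] at h3
        simp only [List.headD_cons] at h3
        obtain ⟨n, hn⟩ := Option.isSome_iff_exists.mp h3
        have hstep : parsePyStep (false, d, []) x
            = (false, d.insert n (PySem.Str.replace b "\"" ""), []) := by
          simp [parsePyStep, hx, hs, hn]
        have hrest : ∀ line ∈ xs.take ((PySem.List.index? xs "").getD xs.length),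
            ((PySem.Str.split? line ": ").getD []).length = 2 ∧
              (PySem.Int.ofStr? (((PySem.Str.split? line ": ").getD []).headD "")).isSome = true := by
          intro line hl
          exact h line (by rw [hblank]; simp [List.take_succ_cons]; right; exact hl)
        have hrule : ruleOf x = (n, PySem.Str.replace b "\"" "") := by
          simp [ruleOf, hs, hn]
        rw [List.foldl_cons, hstep, ih _ hrest, hblank]
        simp [List.take_succ_cons, List.drop_succ_cons, hrule, hx]
      | [] => rw [hs] at h2; simp at h2
      | [a] => rw [hs] at h2; simp at h2
      | a :: b :: c :: t => rw [hs] at h2; simp at h2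

-- ===== VERDICT (by name: the statement is the Claim_ definition above) =====
theorem parse_py_spec : Claim_equal_parse_py := by
  intro lines _ hpre
  show _ = _
  unfold parse_py parse_py_alt
  rw [foldl_step_false lines PySem.Dict.empty hpre]
  rfl
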